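-- pv_equiv track=rewrite | github.com/gskaggs/Competitive-Programming | contests/foobar/disorder/soln.py | update_partition
-- ===== SOURCE A (Python) =====
-- def update_partition(p, k):
--     rem_val = 0
--     while k >= 0 and p[k] == 1:
--         rem_val += p[k]
--         k -= 1
--
--     # if k < 0, all the values are 1 so
--     # there are no more partitions
--     if k < 0:
--         return p, k
--
--     # Decrease the p[k] found above
--     # and adjust the rem_val
--     p[k] -= 1
--     rem_val += 1
--
--     # If rem_val is more, then the sorted
--     # order is violated. Divide rem_val in
--     # different values of size p[k] and copy
--     # these values at different positions after p[k]
--     while rem_val > p[k]: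
--         p[k + 1] = p[k]
--         rem_val = rem_val - p[k]
--         k += 1
--
--     # Copy rem_val to next position
--     # and increment position
--     p[k + 1] = rem_val
--     k += 1
--
--     return p, k
-- ===== SOURCE B (Python) =====
-- def update_partition(p, k):
--     # Scan back over the trailing 1s to find the last part > 1.
--     j = k
--     while j >= 0 and p[j] == 1:
--         j -= 1
--     if j < 0:
--         return p, j
--     val = p[j] - 1
--     rem = k - j + 1          # the freed mass to redistribute
--     a, b = divmod(rem, val)
--     full, last = (a - 1, val) if b == 0 else (a, b)
--     # splice: full+1 copies of val (including the decremented slot) then the remainder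
--     p[j : j + full + 2] = [val] * (full + 1) + [last]
--     return p, j + full + 1
-- ===== Notes on version B (the rewrite author's own statement) =====
-- stated objective: simpler
-- what changed: B replaces A's repeated-subtraction redistribution loop (write one chunk, subtract, advance) by a single divmod that computes the number of full chunks and the final remainder, and writes them all at once with one slice assignment.
import Mathlib
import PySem

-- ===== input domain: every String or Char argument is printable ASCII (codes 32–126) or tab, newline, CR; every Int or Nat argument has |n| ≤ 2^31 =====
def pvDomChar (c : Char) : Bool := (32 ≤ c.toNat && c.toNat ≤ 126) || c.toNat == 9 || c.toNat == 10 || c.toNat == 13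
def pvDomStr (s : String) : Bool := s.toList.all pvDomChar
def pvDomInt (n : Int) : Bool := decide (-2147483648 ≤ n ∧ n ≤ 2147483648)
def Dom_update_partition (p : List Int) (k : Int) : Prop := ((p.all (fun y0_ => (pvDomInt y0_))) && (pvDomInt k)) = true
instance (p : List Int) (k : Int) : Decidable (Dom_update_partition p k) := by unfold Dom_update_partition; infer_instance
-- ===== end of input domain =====

-- B replaces A's repeated-subtraction redistribution loop by one divmod plus a single
-- slice assignment (objective: simpler). Both Pythons mutate p in place; the equivalence
-- proved here is about the returned (p, k) pair, and B performs the analogous mutation.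

-- ===== PORT A =====
-- while k >= 0 and p[k] == 1: rem_val += p[k]; k -= 1
def aScan (p : List Int) (k rem : Int) : Int × Int :=
  if _h : 0 ≤ k ∧ PySem.List.pyGetD p k 0 = 1 then
    aScan p (k - 1) (rem + PySem.List.pyGetD p k 0)
  else (k, rem)
termination_by (k + 1).toNat
decreasing_by omega

-- while rem_val > p[k]: p[k+1] = p[k]; rem_val -= p[k]; k += 1
-- (the two bound conjuncts only make the recursion total: where they fail Python's
--  p[k+1] = … raises IndexError, which Pre_ excludes)
def aFill (p : List Int) (k rem : Int) : List Int × Int × Int :=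
  if _h : rem > PySem.List.pyGetD p k 0 ∧ 0 ≤ k + 1 ∧ k + 1 < (p.length : Int) then
    aFill (PySem.List.pySetD p (k + 1) (PySem.List.pyGetD p k 0)) (k + 1)
      (rem - PySem.List.pyGetD p k 0)
  else (p, k, rem)
termination_by p.length - (k + 1).toNat
decreasing_by simp [PySem.List.length_pySetD] at *; omega

def update_partition (p : List Int) (k : Int) : List Int × Int :=
  let s := aScan p k 0
  if s.1 < 0 then (p, s.1)
  else
    -- p[k] -= 1; rem_val += 1
    let p1 := PySem.List.pySetD p s.1 (PySem.List.pyGetD p s.1 0 - 1)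
    let r := aFill p1 s.1 (s.2 + 1)
    -- p[k+1] = rem_val; k += 1
    (PySem.List.pySetD r.1 (r.2.1 + 1) r.2.2, r.2.1 + 1)

-- ===== PORT B =====
-- while j >= 0 and p[j] == 1: j -= 1
def bScan (p : List Int) (j : Int) : Int :=
  if h : 0 ≤ j ∧ PySem.List.pyGetD p j 0 = 1 then bScan p (j - 1) else j
termination_by (j + 1).toNat
decreasing_by omega

def update_partition_alt (p : List Int) (k : Int) : List Int × Int :=
  let j := bScan p k
  if j < 0 then (p, j)
  else
    let val := PySem.List.pyGetD p j 0 - 1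
    let rem := k - j + 1
    let ab := (PySem.Int.divmod? rem val).getD (0, 0)  -- val ≠ 0 under Pre_ (Python raises otherwise)
    let fl := if ab.2 = 0 then (ab.1 - 1, val) else ab
    -- slice assignment p[j : j+fl.1+2] = [val]*(fl.1+1) + [fl.2]; under Pre_ the bounds are
    -- nonnegative and in range, where Python's slice write is exactly this take/++/drop splice
    (p.take j.toNat ++ List.replicate (fl.1 + 1).toNat val ++ [fl.2] ++ p.drop (j + fl.1 + 2).toNat,
     j + fl.1 + 1)

-- ===== PRECONDITION & SPEC =====
-- Pre_ is exactly where the Python A returns: k in range (for k ≥ 0), and — for the last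
-- index j ≤ k whose entry is not 1, characterized below by "p[j] ≠ 1 and every later entry
-- up to k is 1" — the part being split exceeds 1 (else A's redistribution loop runs off the
-- end of the list) and the redistributed chunks fit inside the list (else a write
-- p[k+1] = … raises IndexError). If p[0..k] is all ones the inner condition is vacuous.
def Pre_update_partition (p : List Int) (k : Int) : Prop :=
  0 ≤ k →
    k < (p.length : Int) ∧
    ∀ j ∈ List.range p.length, (j : Int) ≤ k → p.getD j 0 ≠ 1 →
      (∀ i ∈ List.range p.length, (j : Int) < (i : Int) → (i : Int) ≤ k → p.getD i 0 = 1) →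
      (2 ≤ p.getD j 0 ∧
        (j : Int) + (k - (j : Int)) / (p.getD j 0 - 1) + 2 ≤ (p.length : Int))
instance (p : List Int) (k : Int) : Decidable (Pre_update_partition p k) := by
  unfold Pre_update_partition; infer_instance

def pvWitness_update_partition : List Int × Int := ([3, 1, 1], 2)

def Spec_update_partition (p : List Int) (k : Int) (out : List Int × Int) : Prop := out = update_partition_alt p k
instance (p : List Int) (k : Int) (out : List Int × Int) : Decidable (Spec_update_partition p k out) := by unfold Spec_update_partition; infer_instance

-- ===== CLAIM (what is proved, stated in full; the proofs are below) =====
def Claim_equal_update_partition : Prop := ∀ (p : List Int) (k : Int), Dom_update_partition p k → Pre_update_partition p k → Spec_update_partition p k (update_partition p k)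

-- ===== LEMMAS AND PROOFS =====

theorem bScan_step (p : List Int) (j : Int)
    (h : 0 ≤ j ∧ PySem.List.pyGetD p j 0 = 1) : bScan p j = bScan p (j - 1) := by
  rw [bScan, dif_pos h]

theorem bScan_id (p : List Int) (j : Int)
    (h : ¬ (0 ≤ j ∧ PySem.List.pyGetD p j 0 = 1)) : bScan p j = j := by
  rw [bScan, dif_neg h]

theorem bScan_le (p : List Int) (j : Int) : bScan p j ≤ j := by
  fun_induction bScan with
  | case1 j h ih => omega
  | case2 j h => omega

theorem bScan_stop (p : List Int) (j : Int) :
    ¬ (0 ≤ bScan p j ∧ PySem.List.pyGetD p (bScan p j) 0 = 1) := by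
  fun_induction bScan with
  | case1 j h ih => exact ih
  | case2 j h => simpa [bScan_id p j h] using h

theorem bScan_ones (p : List Int) (j : Int) :
    ∀ i : Int, bScan p j < i → i ≤ j → PySem.List.pyGetD p i 0 = 1 := by
  fun_induction bScan with
  | case1 j h ih =>
      intro i h1 h2
      by_cases hij : i = j
      · subst hij; exact h.2
      · exact ih i h1 (by omega)
  | case2 j h =>
      intro i h1 h2
      omega

theorem aScan_eq (p : List Int) (k rem : Int) :
    aScan p k rem = (bScan p k, rem + (k - bScan p k)) := by
  fun_induction aScan with
  | case1 k rem h ih =>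
      rw [ih]
      rw [bScan_step p k h, h.2]; ring_nf
  | case2 k rem h =>
      rw [bScan_id p k h]; simp

-- the (full-chunk count, final remainder) pair both sides produce
def flOf (rem val : Int) : Int × Int :=
  if rem % val = 0 then (rem / val - 1, val) else (rem / val, rem % val)

theorem flOf_fst (rem val : Int) (hval : 1 ≤ val) :
    (flOf rem val).1 = (rem - 1) / val := by
  rw [flOf]
  have e1 := Int.mul_ediv_add_emod rem val
  have hr0 : 0 ≤ rem % val := Int.emod_nonneg rem (by omega)
  have hrb : rem % val < val := Int.emod_lt_of_pos rem (by omega)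
  by_cases h : rem % val = 0
  · have h2 : rem - 1 = (val - 1) + (rem / val - 1) * val := by linear_combination -e1 + h
    rw [if_pos h, h2, Int.add_mul_ediv_right _ _ (by omega : val ≠ 0),
      Int.ediv_eq_zero_of_lt (a := val - 1) (by omega) (by omega), zero_add]
  · have h2 : rem - 1 = (rem % val - 1) + (rem / val) * val := by linear_combination -e1
    rw [if_neg h, h2, Int.add_mul_ediv_right _ _ (by omega : val ≠ 0),
      Int.ediv_eq_zero_of_lt (a := rem % val - 1) (by omega) (by omega), zero_add]

-- A's fill loop followed by the final write equals B's divmod splice, for any list P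
-- with P[kk] = val ≥ 1 and enough room
theorem fill_splice (n : Nat) (P : List Int) (kk rem val : Int)
    (hn : rem.toNat = n) (hval : 1 ≤ val) (hrem : 1 ≤ rem) (hkk : 0 ≤ kk)
    (hget : PySem.List.pyGetD P kk 0 = val)
    (hlen : kk + (flOf rem val).1 + 2 ≤ (P.length : Int)) :
    (PySem.List.pySetD (aFill P kk rem).1 ((aFill P kk rem).2.1 + 1) (aFill P kk rem).2.2,
      (aFill P kk rem).2.1 + 1) =
    ((P.take kk.toNat ++ List.replicate ((flOf rem val).1 + 1).toNat val ++ [(flOf rem val).2]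
        ++ P.drop (kk + (flOf rem val).1 + 2).toNat : List Int),
      kk + (flOf rem val).1 + 1) := by
  induction n using Nat.strong_induction_on generalizing P kk rem with
  | _ n ih =>
  have e1 := Int.mul_ediv_add_emod rem val
  have hr0 : 0 ≤ rem % val := Int.emod_nonneg rem (by omega)
  have hrb : rem % val < val := Int.emod_lt_of_pos rem (by omega)
  have hf0 : 0 ≤ (flOf rem val).1 := by
    rw [flOf_fst rem val hval]
    exact Int.ediv_nonneg (by omega) (by omega)
  have hlen' : kk + 2 ≤ (P.length : Int) := by omega
  have hkl : kk.toNat < P.length := by omega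
  have hk1l : kk.toNat + 1 < P.length := by omega
  have hgetE : P[kk.toNat] = val := by
    rw [← PySem.List.pyGetD_eq_getElem P (i := kk) 0 hkk (by omega)]
    exact hget
  have htake : P.take (kk.toNat + 1) = P.take kk.toNat ++ [val] := by
    rw [List.take_add_one]
    simp [List.getElem?_eq_getElem hkl, hgetE]
  by_cases hle : rem ≤ val
  · -- base case: the loop does not run; flOf rem val = (0, rem)
    have hstop : ¬ (rem > PySem.List.pyGetD P kk 0 ∧ 0 ≤ kk + 1 ∧ kk + 1 < (P.length : Int)) := by
      rw [hget]; omega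
    rw [aFill, dif_neg hstop]
    show (PySem.List.pySetD P (kk + 1) rem, kk + 1) = _
    have hfl : flOf rem val = ((0 : Int), rem) := by
      rw [flOf]
      by_cases hc : rem = val
      · subst hc; simp [Int.ediv_self (by omega : rem ≠ 0)]
      · have hlt : rem < val := by omega
        rw [Int.emod_eq_of_lt (by omega) hlt, Int.ediv_eq_zero_of_lt (by omega) hlt]
        simp; omega
    rw [hfl, Prod.mk.injEq]
    refine ⟨?_, by simp⟩
    rw [PySem.List.pySetD_of_nonneg _ _ (by omega)]
    have h1 : (kk + 1).toNat = kk.toNat + 1 := by omega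
    have h2 : (kk + (0:Int) + 2).toNat = kk.toNat + 1 + 1 := by omega
    rw [h1, List.set_eq_take_cons_drop rem hk1l, htake, h2]
    simp
  · -- inductive step: one iteration of the loop
    have hgo : rem > PySem.List.pyGetD P kk 0 ∧ 0 ≤ kk + 1 ∧ kk + 1 < (P.length : Int) := by
      rw [hget]; exact ⟨by omega, by omega, by omega⟩
    have hstep : aFill P kk rem
        = aFill (PySem.List.pySetD P (kk + 1) val) (kk + 1) (rem - val) := by
      rw [aFill, dif_pos hgo, hget]
    set P' := PySem.List.pySetD P (kk + 1) val with hP'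
    have hP'set : P' = P.set (kk.toNat + 1) val := by
      rw [hP', PySem.List.pySetD_of_nonneg _ _ (by omega)]
      congr 1; omega
    have hlenP' : P'.length = P.length := by rw [hP'set]; simp
    have hq' : (rem - val) / val = rem / val - 1 := by
      have h3 : rem - val = rem + (-1) * val := by ring
      rw [h3, Int.add_mul_ediv_right _ _ (by omega : val ≠ 0)]; ring
    have hb' : (rem - val) % val = rem % val := Int.sub_emod_right rem val
    have hflrel : flOf (rem - val) val = ((flOf rem val).1 - 1, (flOf rem val).2) := by
      rw [flOf, flOf, hq', hb']
      split_ifs <;> rfl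
    have hfl1 : 1 ≤ (flOf rem val).1 := by
      rw [flOf]
      split_ifs with hb0
      · have h5 : val * 1 < val * (rem / val) := by omega
        have := (Int.mul_lt_mul_left (by omega : 0 < val)).mp h5
        simp; omega
      · have h5 : val * 0 < val * (rem / val) := by omega
        have := (Int.mul_lt_mul_left (by omega : 0 < val)).mp h5
        simp; omega
    have ihe := ih (rem - val).toNat (by omega) P' (kk + 1) (rem - val)
      rfl (by omega) (by omega)
      (by rw [hP', show (kk + 1 : Int) = ((kk.toNat + 1 : Nat) : Int) from by omega,
              PySem.List.pyGetD_pySetD_natCast P (kk.toNat + 1) (kk.toNat + 1) val 0 hk1l]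
          simp)
      (by rw [hflrel]; push_cast [hlenP']; omega)
    rw [hstep, ihe, hflrel, Prod.mk.injEq]
    refine ⟨?_, by omega⟩
    -- convert the splice on P' to the splice on P
    have ht1 : (kk + 1).toNat = kk.toNat + 1 := by omega
    have ht2 : P'.take (kk.toNat + 1) = P.take kk.toNat ++ [val] := by
      rw [hP'set, List.take_set_of_le (le_refl _), htake]
    have hd1 : (kk + 1 + ((flOf rem val).1 - 1) + 2).toNat = (kk + (flOf rem val).1 + 2).toNat := by
      omega
    have hd2 : P'.drop (kk + (flOf rem val).1 + 2).toNat
        = P.drop (kk + (flOf rem val).1 + 2).toNat := by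
      rw [hP'set, List.drop_set_of_lt (by omega)]
    have hrep : ((flOf rem val).1 - 1 + 1).toNat = (flOf rem val).1.toNat := by omega
    have hrep2 : ((flOf rem val).1 + 1).toNat = (flOf rem val).1.toNat + 1 := by omega
    rw [ht1, ht2, hd1, hd2, hrep, hrep2]
    simp [List.replicate_succ]

-- ===== VERDICT (by name: the statement is the Claim_ definition above) =====
theorem update_partition_spec : Claim_equal_update_partition := by
  unfold Claim_equal_update_partition
  intro p k _hdom hpre
  unfold Spec_update_partition update_partition update_partition_alt
  rw [Pre_update_partition] at hpre
  simp only [aScan_eq]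
  set j := bScan p k with hj
  have hjk : j ≤ k := bScan_le p k
  by_cases hneg : j < 0
  · simp [hneg]
  · simp only [if_neg hneg]
    have hj0 : 0 ≤ j := by omega
    have hk0 : 0 ≤ k := by omega
    obtain ⟨hkl, hrest⟩ := hpre hk0
    have hjlen : j.toNat < p.length := by omega
    have hcast : ((j.toNat : Nat) : Int) = j := by omega
    have hgetcast : p.getD j.toNat 0 = PySem.List.pyGetD p j 0 := by
      rw [← hcast, PySem.List.pyGetD_natCast, Int.toNat_natCast]
    have hne1 : p.getD j.toNat 0 ≠ 1 := by
      rw [hgetcast]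
      have := bScan_stop p k
      rw [← hj] at this
      intro hc; exact this ⟨hj0, hc⟩
    have hones : ∀ i ∈ List.range p.length, (j.toNat : Int) < (i : Int) → (i : Int) ≤ k →
        p.getD i 0 = 1 := by
      intro i _ hi1 hi2
      have := bScan_ones p k i (by omega) hi2
      rw [← PySem.List.pyGetD_natCast (n := i) (d := 0)] at *
      simpa using this
    obtain ⟨hv2', hlen'⟩ := hrest j.toNat (List.mem_range.mpr hjlen) (by omega) hne1 hones
    rw [hgetcast] at hv2' hlen'
    rw [hcast] at hlen'
    have hv2 : 2 ≤ PySem.List.pyGetD p j 0 := hv2'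
    have hlen : j + (k - j) / (PySem.List.pyGetD p j 0 - 1) + 2 ≤ (p.length : Int) := hlen'
    set v := PySem.List.pyGetD p j 0 with hv
    set val := v - 1 with hvaldef
    have hval : 1 ≤ val := by omega
    set rem : Int := k - j + 1 with hrem
    have hrem1 : 1 ≤ rem := by omega
    have hjl : j.toNat < p.length := by omega
    -- the decremented list
    have hget1 : PySem.List.pyGetD (PySem.List.pySetD p j (v - 1)) j 0 = val := by
      rw [show (j : Int) = ((j.toNat : Nat) : Int) from by omega,
        PySem.List.pyGetD_pySetD_natCast p j.toNat j.toNat (v - 1) 0 hjl]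
      simp [hvaldef]
    have hlenfl : j + (flOf rem val).1 + 2
        ≤ ((PySem.List.pySetD p j (v - 1)).length : Int) := by
      rw [flOf_fst rem val hval, PySem.List.length_pySetD]
      have : rem - 1 = k - j := by omega
      rw [this]
      exact hlen
    have main := fill_splice rem.toNat (PySem.List.pySetD p j (v - 1)) j rem val
      rfl hval hrem1 hj0 hget1 hlenfl
    have hzero : (0 : Int) + (k - j) + 1 = rem := by omega
    rw [hzero, main]
    -- identify B's divmod pair with flOf
    have hvne : val ≠ 0 := by omega
    have hdm : (PySem.Int.divmod? rem val).getD (0, 0)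
        = (rem / val, rem % val) := by
      rw [show PySem.Int.divmod? rem val
            = some (PySem.Int.floordiv rem val, PySem.Int.mod rem val) from by
          simp [PySem.Int.divmod?, PySem.Int.floordiv, PySem.Int.mod, hvne],
        Option.getD_some,
        PySem.Int.floordiv_eq_ediv_of_pos (by omega : (0:Int) < val),
        PySem.Int.mod_eq_emod_of_pos (by omega : (0:Int) < val)]
    rw [hdm]
    have hflB : (if ((rem / val, rem % val) : Int × Int).2 = 0
        then (((rem / val, rem % val) : Int × Int).1 - 1, val)
        else ((rem / val, rem % val) : Int × Int)) = flOf rem val := by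
      rw [flOf]
    rw [hflB, Prod.mk.injEq]
    have hf0 : 0 ≤ (flOf rem val).1 := by
      rw [flOf_fst rem val hval]
      exact Int.ediv_nonneg (by omega) (by omega)
    refine ⟨?_, rfl⟩
    -- take/drop of the decremented list agree with take/drop of p off index j
    have h1 : (PySem.List.pySetD p j (v - 1)).take j.toNat = p.take j.toNat := by
      rw [PySem.List.pySetD_of_nonneg _ _ hj0, List.take_set_of_le (le_refl _)]
    have h2 : (PySem.List.pySetD p j (v - 1)).drop (j + (flOf rem val).1 + 2).toNat
        = p.drop (j + (flOf rem val).1 + 2).toNat := by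
      rw [PySem.List.pySetD_of_nonneg _ _ hj0, List.drop_set_of_lt (by omega)]
    rw [h1, h2]
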